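-- pv_equiv track=rewrite | github.com/Dikabraxis/Pathdog | pathdog/report/html.py | _format_command_line
-- ===== SOURCE A (Python) =====
-- def _escape(s: str) -> str:
--     return (s.replace("&", "&amp;").replace("<", "&lt;")
--              .replace(">", "&gt;").replace('"', "&quot;"))
--
-- def _format_command_line(command: str) -> str:
--     escaped = _escape(command)
--     out = []
--     i = 0
--     while i < len(escaped):
--         start = escaped.find("&lt;", i)
--         if start == -1:
--             out.append(escaped[i:])
--             break
--         end = escaped.find("&gt;", start)
--         if end == -1:
--             out.append(escaped[i:])
--             break
--         token = escaped[start + 4:end]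
--         if not token or not all(c.isalnum() or c in "_-.$" for c in token):
--             out.append(escaped[i:start + 4])
--             i = start + 4
--             continue
--         out.append(escaped[i:start])
--         out.append(f'<span class="placeholder">{escaped[start:end + 4]}</span>')
--         i = end + 4
--     return "".join(out)
-- ===== SOURCE B (Python) =====
-- def _esc_char(c):
--     if c == "&":
--         return "&amp;"
--     if c == "<":
--         return "&lt;"
--     if c == ">":
--         return "&gt;"
--     if c == '"':
--         return "&quot;"
--     return c
--
-- def _format_command_line(command: str) -> str:
--     escaped = "".join(map(_esc_char, command))
--     out = []
--     i, n = 0, len(escaped)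
--     while i < n:
--         if escaped.startswith("&lt;", i):
--             j = i + 4
--             while j < n and (escaped[j].isalnum() or escaped[j] in "_-.$"):
--                 j += 1
--             if j > i + 4 and escaped.startswith("&gt;", j):
--                 out.append(f'<span class="placeholder">{escaped[i:j + 4]}</span>')
--                 i = j + 4
--                 continue
--             out.append("&lt;")
--             i += 4
--         else:
--             out.append(escaped[i])
--             i += 1
--     return "".join(out)
-- ===== Notes on version B (the rewrite author's own statement) =====
-- stated objective: alternative
-- what changed: Replaces the four chained str.replace passes with a single per-character escape pass, and the find/slice cursor loop (substring search, slicing, restart-by-4) with a one-pass character automaton that recognises the escaped angle-bracket opener, takes the maximal run of valid token characters and checks for an immediately following escaped closer.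
import Mathlib
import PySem

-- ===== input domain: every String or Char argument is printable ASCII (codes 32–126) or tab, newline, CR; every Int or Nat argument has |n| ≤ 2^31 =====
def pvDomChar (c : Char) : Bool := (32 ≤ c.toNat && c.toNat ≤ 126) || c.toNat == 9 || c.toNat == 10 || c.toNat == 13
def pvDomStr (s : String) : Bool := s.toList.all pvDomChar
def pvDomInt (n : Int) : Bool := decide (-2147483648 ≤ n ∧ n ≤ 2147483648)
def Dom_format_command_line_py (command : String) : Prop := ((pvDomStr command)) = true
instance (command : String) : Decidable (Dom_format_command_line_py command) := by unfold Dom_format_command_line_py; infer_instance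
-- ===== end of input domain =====

-- B replaces A's chained replace passes and find/slice cursor loop by a single-pass
-- per-character escape and a one-pass character automaton; same return value (alternative).

-- ===== PORT A =====
-- token characters: c.isalnum() or c in "_-.$" (isalnum exact on the ASCII domain)
def pvValid (c : Char) : Bool :=
  PySem.Chars.isalnum c || c == '_' || c == '-' || c == '.' || c == '$'

-- _escape: the four chained str.replace calls
def pvEscapeA (s : List Char) : List Char :=
  PySem.Chars.replace
    (PySem.Chars.replace
      (PySem.Chars.replace
        (PySem.Chars.replace s ['&'] ['&','a','m','p',';'])
        ['<'] ['&','l','t',';'])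
      ['>'] ['&','g','t',';'])
    ['"'] ['&','q','u','o','t',';']

-- the while-loop of A, on the escaped char list; fuel = length + 1 suffices since i strictly grows
def pvLoopA (es : List Char) : Nat → Nat → List Char
  | 0, _ => []
  | fuel+1, i =>
    if i < es.length then
      let start := PySem.Chars.findFrom es ['&','l','t',';'] (i : Int) none
      if start = -1 then
        PySem.Chars.slice es (some (i : Int)) none
      else
        let e := PySem.Chars.findFrom es ['&','g','t',';'] start none
        if e = -1 then
          PySem.Chars.slice es (some (i : Int)) none
        else
          let token := PySem.Chars.slice es (some (start + 4)) (some e)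
          if token.isEmpty || !(token.all pvValid) then
            PySem.Chars.slice es (some (i : Int)) (some (start + 4)) ++
              pvLoopA es fuel (start + 4).toNat
          else
            PySem.Chars.slice es (some (i : Int)) (some start) ++
              "<span class=\"placeholder\">".toList ++
              PySem.Chars.slice es (some start) (some (e + 4)) ++
              "</span>".toList ++
              pvLoopA es fuel (e + 4).toNat
    else []

def format_command_line_py (command : String) : String :=
  let escaped := pvEscapeA command.toList
  String.mk (pvLoopA escaped (escaped.length + 1) 0)

-- ===== PORT B =====
def pvEscChar (c : Char) : List Char :=
  if c == '&' then ['&','a','m','p',';']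
  else if c == '<' then ['&','l','t',';']
  else if c == '>' then ['&','g','t',';']
  else if c == '"' then ['&','q','u','o','t',';']
  else [c]

-- the character automaton of B: escaped opener → maximal run of valid token chars → escaped closer?
def pvGoB : List Char → List Char
  | [] => []
  | c :: rest =>
    if ['&','l','t',';'].isPrefixOf (c :: rest) then
      let run := (rest.drop 3).takeWhile pvValid
      let rest' := (rest.drop 3).dropWhile pvValid
      if !run.isEmpty && ['&','g','t',';'].isPrefixOf rest' then
        "<span class=\"placeholder\">".toList ++ ['&','l','t',';'] ++ run ++
          ['&','g','t',';'] ++ "</span>".toList ++ pvGoB (rest'.drop 4)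
      else
        ['&','l','t',';'] ++ pvGoB (rest.drop 3)
    else c :: pvGoB rest
  termination_by l => l.length
  decreasing_by
  all_goals
    (have h1 := List.length_dropWhile_le (p := pvValid) (l := rest.drop 3);
     have h2 : (rest.drop 3).length ≤ rest.length := by simp;
     simp_all) <;> omega

def format_command_line_py_alt (command : String) : String :=
  String.mk (pvGoB (command.toList.flatMap pvEscChar))

-- ===== PRECONDITION & SPEC =====
def Spec_format_command_line_py (command : String) (out : String) : Prop := out = format_command_line_py_alt command
instance (command : String) (out : String) : Decidable (Spec_format_command_line_py command out) := by unfold Spec_format_command_line_py; infer_instance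

-- ===== CLAIM (what is proved, stated in full; the proofs are below) =====
def Claim_equal_format_command_line_py : Prop := ∀ (command : String), Dom_format_command_line_py command → Spec_format_command_line_py command (format_command_line_py command)

-- ===== LEMMAS AND PROOFS =====

theorem pv_go_single (ch : Char) (r : List Char) :
    ∀ (fuel : Nat) (l acc : List Char), l.length ≤ fuel →
    PySem.Chars.replace.go [ch] r fuel l acc
      = acc.reverse ++ l.flatMap (fun x => if x == ch then r else [x]) := by
  intro fuel
  induction fuel with
  | zero =>
    intro l acc h
    have hl : l = [] := List.eq_nil_of_length_eq_zero (Nat.le_zero.mp h)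
    subst hl; simp [PySem.Chars.replace.go]
  | succ n ih =>
    intro l acc h
    cases l with
    | nil => simp [PySem.Chars.replace.go]
    | cons c t =>
      rw [PySem.Chars.replace.go]
      by_cases hc : ch = c
      · subst hc
        rw [if_pos (by simp [List.isPrefixOf])]
        simp only [List.length_cons, List.length_nil, List.drop_succ_cons, List.drop_zero]
        rw [ih t (r.reverse ++ acc) (by simpa using Nat.le_of_succ_le_succ h)]
        simp
      · rw [if_neg (by simp [List.isPrefixOf]; exact hc)]
        rw [ih t (c :: acc) (by simpa using Nat.le_of_succ_le_succ h)]
        simp only [List.flatMap_cons, List.reverse_cons, List.append_assoc, List.singleton_append, beq_iff_eq]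
        rw [if_neg (fun h' => hc h'.symm)]
        simp

theorem pv_rep_single (ch : Char) (r : List Char) (l : List Char) :
    PySem.Chars.replace l [ch] r = l.flatMap (fun x => if x == ch then r else [x]) := by
  rw [PySem.Chars.replace]
  rw [if_neg (by simp)]
  exact pv_go_single ch r l.length l [] (le_refl _)

theorem pv_escape_eq (l : List Char) : pvEscapeA l = l.flatMap pvEscChar := by
  unfold pvEscapeA
  rw [pv_rep_single, pv_rep_single, pv_rep_single, pv_rep_single]
  induction l with
  | nil => rfl
  | cons c t ih =>
    simp only [List.flatMap_cons, List.flatMap_append, ih]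
    congr 1
    by_cases h1 : c = '&'
    · subst h1; rfl
    by_cases h2 : c = '<'
    · subst h2; rfl
    by_cases h3 : c = '>'
    · subst h3; rfl
    by_cases h4 : c = '"'
    · subst h4; rfl
    simp [pvEscChar, h1, h2, h3, h4]

theorem pv_goB_noLt (l : List Char) (h : ¬ ['&','l','t',';'] <:+: l) : pvGoB l = l := by
  induction l using pvGoB.induct with
  | case1 => simp [pvGoB]
  | case2 c rest h1 _ _ => exact absurd ((List.isPrefixOf_iff_prefix.mp h1).isInfix) h
  | case3 c rest h1 _ _ => exact absurd ((List.isPrefixOf_iff_prefix.mp h1).isInfix) h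
  | case4 c rest h1 ih =>
    rw [pvGoB, if_neg h1]
    rw [ih (fun h' => h (h'.trans (List.suffix_cons c rest).isInfix))]

theorem pv_goB_noGt (l : List Char) (h : ¬ ['&','g','t',';'] <:+: l) : pvGoB l = l := by
  induction l using pvGoB.induct with
  | case1 => simp [pvGoB]
  | case2 c rest h1 _ _ hacc _ =>
    exfalso
    apply h
    have hpre : ['&','g','t',';'] <+: (rest.drop 3).dropWhile pvValid :=
      List.isPrefixOf_iff_prefix.mp (by simpa using (Bool.and_eq_true_iff.mp hacc).2)
    exact hpre.isInfix.trans
      (((List.dropWhile_suffix pvValid).trans (List.drop_suffix 3 rest)).trans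
        (List.suffix_cons c rest)).isInfix
  | case3 c rest h1 _ _ h2 ih =>
    rw [pvGoB, if_pos h1, if_neg h2]
    have hngt : ¬ ['&','g','t',';'] <:+: rest.drop 3 := fun h' =>
      h (h'.trans (((List.drop_suffix 3 rest).trans (List.suffix_cons c rest)).isInfix))
    rw [ih hngt]
    obtain ⟨t, ht⟩ := List.isPrefixOf_iff_prefix.mp h1
    cases rest with
    | nil => simp at ht
    | cons a b =>
      injection ht with hc ht1
      injection ht1 with ha ht2
      cases b with
      | nil => simp at ht2
      | cons a2 b2 =>
        injection ht2 with ha2 ht3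
        cases b2 with
        | nil => simp at ht3
        | cons a3 b3 =>
          injection ht3 with ha3 ht4
          subst hc ha ha2 ha3 ht4
          rfl
  | case4 c rest h1 ih =>
    rw [pvGoB, if_neg h1]
    rw [ih (fun h' => h (h'.trans (List.suffix_cons c rest).isInfix))]

theorem pv_goB_skip (k : Nat) (l : List Char) (hk : k ≤ l.length)
    (h : ∀ j < k, ¬ ['&','l','t',';'] <+: l.drop j) :
    pvGoB l = l.take k ++ pvGoB (l.drop k) := by
  induction k generalizing l with
  | zero => simp
  | succ n ih =>
    cases l with
    | nil => simp at hk
    | cons c rest =>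
      have h0 : ¬ ['&','l','t',';'].isPrefixOf (c :: rest) = true := by
        intro hp
        exact h 0 (Nat.succ_pos n) (by simpa using List.isPrefixOf_iff_prefix.mp hp)
      rw [pvGoB, if_neg h0]
      rw [ih rest (by simpa using Nat.le_of_succ_le_succ hk)
        (fun j hj => by simpa using h (j+1) (Nat.succ_lt_succ hj))]
      simp

theorem pv_tw (p : Char → Bool) : ∀ (m : Nat) (l : List Char),
    (l.take m).all p = true → (∀ c cs, l.drop m = c :: cs → p c = false) →
    l.takeWhile p = l.take m ∧ l.dropWhile p = l.drop m := by
  intro m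
  induction m with
  | zero =>
    intro l _ h2
    cases hl : l with
    | nil => simp
    | cons c cs =>
      have hc := h2 c cs (by simp [hl])
      simp [List.takeWhile_cons, List.dropWhile_cons, hc]
  | succ n ih =>
    intro l h1 h2
    cases l with
    | nil => simp
    | cons c cs =>
      simp only [List.take_succ_cons, List.all_cons, Bool.and_eq_true] at h1
      have hr := ih cs h1.2 (fun c' cs' hd => h2 c' cs' (by simpa using hd))
      simp [List.takeWhile_cons, List.dropWhile_cons, h1.1, hr.1, hr.2]

theorem pv_valid_amp : pvValid '&' = false := by decide

theorem pv_prefix_drop {es p : List Char} {s : Nat} (h : p <+: es.drop s) :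
    es.drop s = p ++ es.drop (s + p.length) := by
  obtain ⟨t, ht⟩ := h
  have h2 : es.drop (s + p.length) = t := by
    rw [← List.drop_drop, ← ht, List.drop_left]
  rw [h2, ← ht]

theorem pv_dropWhile_eq_drop (p : Char → Bool) (l : List Char) :
    l.dropWhile p = l.drop (l.takeWhile p).length := by
  induction l with
  | nil => rfl
  | cons c t ih =>
    by_cases hc : p c = true
    · simp [List.dropWhile_cons, List.takeWhile_cons, hc, ih]
    · simp [List.dropWhile_cons, List.takeWhile_cons, hc]

theorem pv_bridge_B (es : List Char) (s e : Nat)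
    (hgpre : ['&','g','t',';'] <+: es.drop e)
    (hes4 : s + 4 ≤ e)
    (hgmin : ∀ j, s ≤ j → j < e → ¬ ['&','g','t',';'] <+: es.drop j)
    (hrest : ['&','g','t',';'] <+: (es.drop (s+4)).dropWhile pvValid) :
    e = s + 4 + ((es.drop (s+4)).takeWhile pvValid).length ∧
    (es.drop (s+4)).take (e - (s+4)) = (es.drop (s+4)).takeWhile pvValid := by
  have hdropR : ∀ k : Nat, (es.drop (s+4)).drop k = es.drop (s+4+k) := fun k => by
    rw [List.drop_drop]
  have hnot : ∀ k < ((es.drop (s+4)).takeWhile pvValid).length,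
      ¬ ['&','g','t',';'] <+: es.drop (s+4+k) := by
    intro k hk hp
    rw [← hdropR] at hp
    have hkR : k < (es.drop (s+4)).length :=
      lt_of_lt_of_le hk (List.takeWhile_prefix (p := pvValid)).length_le
    rw [← List.getElem_cons_drop_succ_eq_drop hkR] at hp
    have hhead : '&' = (es.drop (s+4))[k] := (List.cons_prefix_cons.mp hp).1
    have hvk : pvValid (((es.drop (s+4)).takeWhile pvValid)[k]'hk) = true :=
      List.mem_takeWhile_imp (List.getElem_mem hk)
    have heq : ((es.drop (s+4)).takeWhile pvValid)[k]'hk = (es.drop (s+4))[k]'hkR :=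
      (List.takeWhile_prefix (p := pvValid)).getElem hk
    rw [heq, ← hhead] at hvk
    simp [pv_valid_amp] at hvk
  have hat : ['&','g','t',';'] <+: es.drop (s+4+((es.drop (s+4)).takeWhile pvValid).length) := by
    rw [← hdropR, ← pv_dropWhile_eq_drop]
    exact hrest
  have hle : e ≤ s+4+((es.drop (s+4)).takeWhile pvValid).length := by
    by_contra h'
    exact hgmin _ (by omega) (by omega) hat
  have hge : s+4+((es.drop (s+4)).takeWhile pvValid).length ≤ e := by
    by_contra h'
    exact hnot (e - (s+4)) (by omega) (by rw [show s+4+(e-(s+4)) = e from by omega]; exact hgpre)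
  have he : e = s+4+((es.drop (s+4)).takeWhile pvValid).length := le_antisymm hle hge
  refine ⟨he, ?_⟩
  rw [he, Nat.add_sub_cancel_left]
  exact (List.prefix_iff_eq_take.mp (List.takeWhile_prefix (p := pvValid))).symm

theorem pv_main (es : List Char) (fuel : Nat) : ∀ (i : Nat), es.length - i < fuel →
    i ≤ es.length → pvLoopA es fuel i = pvGoB (es.drop i) := by
  induction fuel with
  | zero => intro i hf hi; omega
  | succ n ih =>
    intro i hf hi
    rw [pvLoopA]
    by_cases hil : i < es.length
    case neg =>
      rw [if_neg hil]
      have : i = es.length := by omega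
      rw [this, List.drop_length]
      simp [pvGoB]
    case pos =>
      rw [if_pos hil]
      simp only []
      by_cases hsneg : PySem.Chars.findFrom es ['&','l','t',';'] (i : Int) none = -1
      · rw [if_pos hsneg]
        have hnin : ¬ (['&','l','t',';'] <:+: es.drop i) :=
          (PySem.Chars.findFrom_natCast_eq_neg_one_iff es _ i hi).mp hsneg
        rw [pv_goB_noLt _ hnin, PySem.Chars.slice_eq_listSlice, PySem.List.slice_from_natCast]
      · rw [if_neg hsneg]
        obtain ⟨hile, hpre, hmin⟩ :=
          PySem.Chars.findFrom_natCast_spec es ['&','l','t',';'] i hi hsneg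
        obtain ⟨s, hseq⟩ : ∃ s : Nat, PySem.Chars.findFrom es ['&','l','t',';'] (i : Int) none = (s : Int) :=
          ⟨_, (Int.toNat_of_nonneg (le_trans (Int.natCast_nonneg i) hile)).symm⟩
        rw [hseq] at hile hpre hmin ⊢
        rw [Int.toNat_natCast] at hpre hmin
        have his : i ≤ s := Int.ofNat_le.mp hile
        have hd : es.drop s = '&'::'l'::'t'::';'::(es.drop (s+4)) := by
          have := pv_prefix_drop hpre
          simpa using this
        have hs4 : s + 4 ≤ es.length := by
          have h1 : (es.drop s).length = es.length - s := List.length_drop ..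
          rw [hd] at h1
          simp at h1
          omega
        -- B side: skip up to s
        have hskip : pvGoB (es.drop i) = (es.drop i).take (s - i) ++ pvGoB (es.drop s) := by
          rw [pv_goB_skip (s - i) (es.drop i) (by rw [List.length_drop]; omega)
            (fun j hj hp => hmin (i + j) (by omega) (by omega)
              (by rwa [List.drop_drop] at hp))]
          rw [List.drop_drop, show i + (s - i) = s from by omega]
        rw [hskip]
        -- evaluate pvGoB (es.drop s) one step
        have hgo : pvGoB (es.drop s) =
            if !((es.drop (s+4)).takeWhile pvValid).isEmpty &&
               ['&','g','t',';'].isPrefixOf ((es.drop (s+4)).dropWhile pvValid) then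
              "<span class=\"placeholder\">".toList ++ ['&','l','t',';'] ++
                ((es.drop (s+4)).takeWhile pvValid) ++ ['&','g','t',';'] ++ "</span>".toList ++
                pvGoB (((es.drop (s+4)).dropWhile pvValid).drop 4)
            else ['&','l','t',';'] ++ pvGoB (es.drop (s+4)) := by
          rw [hd, pvGoB, if_pos (by simp [List.isPrefixOf])]
          simp only [List.drop_succ_cons, List.drop_zero]
        have hsuf4 : (es.drop (s+4)).dropWhile pvValid <:+ es.drop s := by
          have h4 : es.drop (s+4) <:+ es.drop s := by
            rw [show s + 4 = s + 4 from rfl, ← List.drop_drop]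
            exact List.drop_suffix 4 (es.drop s)
          exact (List.dropWhile_suffix pvValid).trans h4
        by_cases heneg : PySem.Chars.findFrom es ['&','g','t',';'] ((s : Int)) none = -1
        · rw [if_pos heneg]
          have hngt : ¬ (['&','g','t',';'] <:+: es.drop s) :=
            (PySem.Chars.findFrom_natCast_eq_neg_one_iff es _ s (by omega)).mp heneg
          have hcondF : (!((es.drop (s+4)).takeWhile pvValid).isEmpty &&
              ['&','g','t',';'].isPrefixOf ((es.drop (s+4)).dropWhile pvValid)) = false := by
            rw [Bool.and_eq_false_iff]
            right
            rw [← Bool.not_eq_true]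
            intro hp
            exact hngt ((List.isPrefixOf_iff_prefix.mp hp).isInfix.trans hsuf4.isInfix)
          rw [hgo, hcondF]
          rw [if_neg (by simp)]
          have hngt4 : ¬ (['&','g','t',';'] <:+: es.drop (s+4)) := fun h' =>
            hngt (h'.trans (by rw [← List.drop_drop]; exact (List.drop_suffix 4 (es.drop s)).isInfix))
          rw [pv_goB_noGt _ hngt4]
          rw [PySem.Chars.slice_eq_listSlice, PySem.List.slice_from_natCast]
          conv_lhs => rw [← List.take_append_drop (s - i) (es.drop i)]
          rw [List.drop_drop, show i + (s - i) = s from by omega, hd]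
          simp
        · rw [if_neg heneg]
          obtain ⟨hsle, hgpre, hgmin⟩ :=
            PySem.Chars.findFrom_natCast_spec es ['&','g','t',';'] s (by omega) heneg
          obtain ⟨e, heeq⟩ : ∃ e : Nat,
              PySem.Chars.findFrom es ['&','g','t',';'] ((s : Int)) none = (e : Int) :=
            ⟨_, (Int.toNat_of_nonneg (le_trans (Int.natCast_nonneg s) hsle)).symm⟩
          rw [heeq] at hsle hgpre hgmin ⊢
          rw [Int.toNat_natCast] at hgpre hgmin
          have hse : s ≤ e := Int.ofNat_le.mp hsle
          have hdrop1 : es.drop (s+1) = 'l'::'t'::';'::(es.drop (s+4)) := by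
            rw [show s + 1 = s + 1 from rfl, ← List.drop_drop, hd]; simp
          have hdrop2 : es.drop (s+2) = 't'::';'::(es.drop (s+4)) := by
            rw [show s + 2 = s + 2 from rfl, ← List.drop_drop, hd]; simp
          have hdrop3 : es.drop (s+3) = ';'::(es.drop (s+4)) := by
            rw [show s + 3 = s + 3 from rfl, ← List.drop_drop, hd]; simp
          have hes4 : s + 4 ≤ e := by
            rcases (by omega : e = s ∨ e = s+1 ∨ e = s+2 ∨ e = s+3 ∨ s+4 ≤ e) with h|h|h|h|h
            · rw [h, hd] at hgpre; simp [List.cons_prefix_cons] at hgpre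
            · rw [h, hdrop1] at hgpre; simp [List.cons_prefix_cons] at hgpre
            · rw [h, hdrop2] at hgpre; simp [List.cons_prefix_cons] at hgpre
            · rw [h, hdrop3] at hgpre; simp [List.cons_prefix_cons] at hgpre
            · exact h
          have he4 : e + 4 ≤ es.length := by
            have h1 : (es.drop e).length = es.length - e := List.length_drop ..
            have h2 := hgpre.length_le
            rw [h1] at h2
            simp at h2
            omega
          have hge : es.drop e = '&'::'g'::'t'::';'::(es.drop (e+4)) := by
            simpa using pv_prefix_drop hgpre
          have hc1 : (s : Int) + 4 = (((s+4 : Nat)) : Int) := by push_cast; ring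
          have hc2 : (e : Int) + 4 = (((e+4 : Nat)) : Int) := by push_cast; ring
          rw [hc1, hc2]
          simp only [PySem.Chars.slice_eq_listSlice, PySem.List.slice_natCast, Int.toNat_natCast]
          have hRdrop : ∀ k : Nat, (es.drop (s+4)).drop k = es.drop (s+4+k) := fun k => by
            rw [List.drop_drop]
          have hsplit : es.drop i = (es.drop i).take (s - i) ++ ('&'::'l'::'t'::';'::(es.drop (s+4))) := by
            conv_lhs => rw [← List.take_append_drop (s - i) (es.drop i)]
            rw [List.drop_drop, show i + (s - i) = s from by omega, hd]
          have hseglen : ((es.drop i).take (s - i)).length = s - i := by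
            rw [List.length_take, List.length_drop]
            omega
          by_cases hB : (!((es.drop (s+4)).takeWhile pvValid).isEmpty &&
              ['&','g','t',';'].isPrefixOf ((es.drop (s+4)).dropWhile pvValid)) = true
          · -- both accept
            obtain ⟨hrunne, hprefB⟩ := Bool.and_eq_true_iff.mp hB
            obtain ⟨heB, htok⟩ := pv_bridge_B es s e hgpre hes4 hgmin
              (List.isPrefixOf_iff_prefix.mp hprefB)
            set run := (es.drop (s+4)).takeWhile pvValid with hrundef
            have hallrun : run.all pvValid = true :=
              List.all_eq_true.mpr (fun x hx => List.mem_takeWhile_imp (hrundef ▸ hx))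
            have hAf : (((es.drop (s+4)).take (e - (s+4))).isEmpty ||
                !((es.drop (s+4)).take (e - (s+4))).all pvValid) = true → False := by
              intro hA
              rw [htok] at hA
              rcases Bool.or_eq_true_iff.mp hA with h' | h'
              · rw [Bool.not_eq_true'] at hrunne; rw [h'] at hrunne; exact absurd hrunne (by simp)
              · rw [hallrun] at h'; simp at h'
            rw [if_neg (fun h => hAf h)]
            rw [hgo, if_pos hB]
            rw [ih (e+4) (by omega) (by omega)]
            have hdw : (es.drop (s+4)).dropWhile pvValid = es.drop e := by
              rw [pv_dropWhile_eq_drop, ← hrundef, hRdrop, ← heB]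
            rw [hdw, List.drop_drop]
            have htake : (es.drop s).take (e + 4 - s) =
                ['&','l','t',';'] ++ run ++ ['&','g','t',';'] := by
              have hRsplit : es.drop (s+4) = run ++ ('&'::'g'::'t'::';'::(es.drop (e+4))) := by
                have h := List.takeWhile_append_dropWhile (p := pvValid) (l := es.drop (s+4))
                rw [hdw, hge, ← hrundef] at h
                exact h.symm
              rw [hd, hRsplit]
              have hlen : e + 4 - s = run.length + 8 := by omega
              rw [show ('&'::'l'::'t'::';'::(run ++ ('&'::'g'::'t'::';'::(es.drop (e+4))))) = ((['&','l','t',';'] ++ run) ++ (['&','g','t',';'] ++ es.drop (e+4))) from by simp]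
              rw [hlen, List.take_append]
              rw [List.take_of_length_le (by simp)]
              rw [show run.length + 8 - (['&','l','t',';'] ++ run).length = 4 from by simp]
              simp [List.take_append, List.append_assoc]
            rw [htake]
            simp [List.append_assoc]
          · -- both reject
            have hBf : (!((es.drop (s+4)).takeWhile pvValid).isEmpty &&
                ['&','g','t',';'].isPrefixOf ((es.drop (s+4)).dropWhile pvValid)) = false :=
              Bool.eq_false_iff.mpr hB
            have hAt : (((es.drop (s+4)).take (e - (s+4))).isEmpty ||
                !((es.drop (s+4)).take (e - (s+4))).all pvValid) = true := by
              by_contra hAc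
              rw [Bool.not_eq_true] at hAc
              obtain ⟨hne, hall⟩ := Bool.or_eq_false_iff.mp hAc
              simp only [Bool.not_eq_eq_eq_not, Bool.not_false] at hall
              try simp at hall
              have hdropm : ∀ c cs, (es.drop (s+4)).drop (e - (s+4)) = c :: cs → pvValid c = false := by
                intro c cs hcs
                rw [hRdrop, show s + 4 + (e - (s+4)) = e from by omega, hge] at hcs
                injection hcs with hc _
                rw [← hc]
                exact pv_valid_amp
              obtain ⟨htw, hdw⟩ := pv_tw pvValid (e - (s+4)) (es.drop (s+4)) (List.all_eq_true.mpr hall) hdropm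
              apply hB
              rw [Bool.and_eq_true_iff]
              constructor
              · rw [htw]; simpa using hne
              · rw [hdw, hRdrop, show s + 4 + (e - (s+4)) = e from by omega, hge]
                simp [List.isPrefixOf]
            rw [if_pos hAt, hgo, hBf]
            rw [if_neg (by simp)]
            rw [ih (s+4) (by omega) (by omega)]
            have htake4 : (es.drop i).take (s + 4 - i) =
                (es.drop i).take (s - i) ++ ['&','l','t',';'] := by
              conv_lhs => rw [hsplit]
              rw [List.take_append, hseglen]
              rw [List.take_of_length_le (by rw [hseglen]; omega)]
              rw [show s + 4 - i - (s - i) = 4 from by omega]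
              rfl
            rw [htake4]
            simp [List.append_assoc]

-- ===== VERDICT (by name: the statement is the Claim_ definition above) =====
theorem format_command_line_py_spec : Claim_equal_format_command_line_py := by
  intro command _
  unfold Spec_format_command_line_py format_command_line_py format_command_line_py_alt
  simp only []
  rw [pv_escape_eq, pv_main _ _ 0 (by omega) (by omega)]
  rfl
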